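-- pv_equiv track=rewrite | github.com/yuubinnkyoku/Mario-Kart-Automatic-Total | test/MKScan_GUI.py | group_players_by_team
-- ===== SOURCE A (Python) =====
-- def group_players_by_team(player_names, prefix_length=1):
--     """プレイヤー名を接頭辞でグループ化し、チーム辞書を作成する."""
--     teams = {}
--     for name in player_names:
--         prefix = name[:prefix_length].lower()
--         if prefix not in teams:
--             teams[prefix] = []
--         teams[prefix].append(name)
--     return teams
-- ===== SOURCE B (Python) =====
-- def group_players_by_team(player_names, prefix_length=1):
--     """Sort-then-scan-runs grouping: decorate each name with its lowercased
--     prefix and position, stably sort by the prefix alone, scan the sorted list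
--     once collecting each contiguous run as a finished team, then order the
--     teams by first appearance of their prefix."""
--     pairs = [(name[:prefix_length].lower(), i, name)
--              for i, name in enumerate(player_names)]
--     pairs.sort(key=lambda t: t[0])
--     runs = []
--     j = 0
--     while j < len(pairs):
--         p = pairs[j][0]
--         first = pairs[j][1]
--         members = []
--         k = j
--         while k < len(pairs) and pairs[k][0] == p:
--             members.append(pairs[k][2])
--             k += 1
--         runs.append((first, p, members))
--         j = k
--     runs.sort(key=lambda r: r[0])
--     return {p: members for _, p, members in runs}
-- ===== Notes on version B (the rewrite author's own statement) =====
-- stated objective: alternative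
-- what changed: Replaces A's single-pass hash-bucketing (dict membership test + append per name) with a sort-then-scan-runs algorithm: decorate each name with (lowercased prefix, position), stably sort by the prefix alone, scan the sorted list once collecting each contiguous run as a complete team, then sort the finished teams by the first-appearance index of their prefix.
import Mathlib
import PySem

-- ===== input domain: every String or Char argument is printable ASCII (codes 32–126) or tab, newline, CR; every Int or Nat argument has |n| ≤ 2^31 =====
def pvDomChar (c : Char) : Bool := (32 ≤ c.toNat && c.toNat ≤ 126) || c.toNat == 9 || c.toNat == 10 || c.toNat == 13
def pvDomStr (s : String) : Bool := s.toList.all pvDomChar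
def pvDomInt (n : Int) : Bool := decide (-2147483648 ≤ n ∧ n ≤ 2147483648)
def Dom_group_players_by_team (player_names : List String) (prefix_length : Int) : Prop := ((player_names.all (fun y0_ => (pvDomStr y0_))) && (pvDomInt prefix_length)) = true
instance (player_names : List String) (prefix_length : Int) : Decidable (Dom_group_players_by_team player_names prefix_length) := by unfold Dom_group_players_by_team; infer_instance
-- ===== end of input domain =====

-- B replaces A's hash-bucketing pass by sort-then-scan-runs: stably sort (prefix, index, name) triples by prefix, collect contiguous runs as teams, order teams by first appearance; alternative algorithm, same result.


-- shared helper: `name[:prefix_length].lower()` exactly as both Pythons write it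
def pvKey (prefix_length : Int) (name : String) : String :=
  PySem.Str.lower (PySem.Str.slice name none (some prefix_length))

-- ===== PORT A =====
def group_players_by_team (player_names : List String) (prefix_length : Int) : List (String × List String) :=
  (player_names.foldl
    (fun teams name =>
      let pfx := pvKey prefix_length name
      let teams := if teams.contains pfx then teams else teams.insert pfx ([] : List String)
      teams.modify pfx [] (fun l => l ++ [name]))
    (PySem.Dict.empty : PySem.Dict String (List String))).items

-- ===== PORT B =====
-- the run scan over the sorted triples: collect each contiguous same-prefix run as one team
def pvScanRuns : List (String × Int × String) → List (Int × String × List String)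
  | [] => []
  | t :: rest =>
    (t.2.1, t.1, ((t :: rest).takeWhile (fun u => u.1 == t.1)).map (fun u => u.2.2)) ::
      pvScanRuns ((t :: rest).dropWhile (fun u => u.1 == t.1))
termination_by l => l.length
decreasing_by
  simp only [List.dropWhile_cons, beq_self_eq_true, reduceIte]
  exact Nat.lt_succ_of_le (List.length_dropWhile_le _ _)

def group_players_by_team_alt (player_names : List String) (prefix_length : Int) : List (String × List String) :=
  let pairs := (PySem.List.enumerate player_names 0).map
    (fun p => (pvKey prefix_length p.2, p.1, p.2))
  let sortedPairs := PySem.List.sorted pairs (fun t => t.1) false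
  let runs := pvScanRuns sortedPairs
  let runsSorted := PySem.List.sorted runs (fun r => r.1) false
  runsSorted.map (fun r => (r.2.1, r.2.2))

-- ===== PRECONDITION & SPEC =====
def Spec_group_players_by_team (player_names : List String) (prefix_length : Int) (out : List (String × List String)) : Prop := out = group_players_by_team_alt player_names prefix_length
instance (player_names : List String) (prefix_length : Int) (out : List (String × List String)) : Decidable (Spec_group_players_by_team player_names prefix_length out) := by unfold Spec_group_players_by_team; infer_instance

-- ===== CLAIM (what is proved, stated in full; the proofs are below) =====
def Claim_equal_group_players_by_team : Prop := ∀ (player_names : List String) (prefix_length : Int), Dom_group_players_by_team player_names prefix_length → Spec_group_players_by_team player_names prefix_length (group_players_by_team player_names prefix_length)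

-- ===== LEMMAS AND PROOFS =====

-- A's create-then-append step is `Dict.modify` with default []
theorem pvStep_eq (d : PySem.Dict String (List String)) (k v : String) :
    (if d.contains k then d else d.insert k ([] : List String)).modify k [] (fun l => l ++ [v])
      = d.modify k [] (fun l => l ++ [v]) := by
  by_cases h : d.contains k
  · simp [h]
  · have hb : d.contains k = false := by simpa using h
    have hk : ∀ p ∈ d.items, p.1 ≠ k := by
      intro p hp hpk
      exact h ((PySem.Dict.contains_iff_mem_keys d k).mpr (hpk ▸ PySem.Dict.mem_keys_of_mem_items d hp))
    have hins : (PySem.Dict.mk (d.items ++ [(k, ([] : List String))])) = d.insert k [] :=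
      (PySem.Dict.ext (PySem.Dict.items_insert_of_not_contains d [] hb)).symm
    simp only [h]
    simp [PySem.Dict.modify, PySem.Dict.insert, h]
    constructor
    · exact (List.map_congr_left fun p hp => if_neg (hk p hp)).trans (List.map_id _)
    · rw [hins, PySem.Dict.getD_insert_self, PySem.Dict.getD_of_not_contains d [] hb]

-- A's whole loop is the plain modify-loop
theorem pvFold_eq (player_names : List String) (prefix_length : Int) :
    player_names.foldl
      (fun teams name =>
        let pfx := pvKey prefix_length name
        let teams := if teams.contains pfx then teams else teams.insert pfx ([] : List String)
        teams.modify pfx [] (fun l => l ++ [name]))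
      (PySem.Dict.empty : PySem.Dict String (List String))
    = player_names.foldl
        (fun teams name => teams.modify (pvKey prefix_length name) [] (fun l => l ++ [name]))
        PySem.Dict.empty := by
  have hf : (fun (teams : PySem.Dict String (List String)) (name : String) =>
        let pfx := pvKey prefix_length name
        let teams := if teams.contains pfx then teams else teams.insert pfx ([] : List String)
        teams.modify pfx [] (fun l => l ++ [name]))
      = fun teams name => teams.modify (pvKey prefix_length name) [] (fun l => l ++ [name]) := by
    funext d n
    exact pvStep_eq d (pvKey prefix_length n) n
  rw [hf]

-- the modify-loop's items are the dedup-then-gather list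
theorem pvItems_eq (player_names : List String) (prefix_length : Int) :
    (player_names.foldl
        (fun teams name => teams.modify (pvKey prefix_length name) [] (fun l => l ++ [name]))
        (PySem.Dict.empty : PySem.Dict String (List String))).items
    = (PySem.List.dedup (player_names.map (pvKey prefix_length))).map
        (fun q => (q, player_names.filter (fun n => pvKey prefix_length n == q))) := by
  set key := pvKey prefix_length
  set D := player_names.foldl (fun teams name => teams.modify (key name) [] (fun l => l ++ [name]))
      (PySem.Dict.empty : PySem.Dict String (List String)) with hD
  have hnd : D.keys.Nodup :=
    PySem.Dict.nodup_keys_foldl_modify_key player_names key [] (fun _ n l => l ++ [n]) _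
      PySem.Dict.nodup_keys_empty
  have hkeys : D.keys = PySem.List.dedup (player_names.map key) := by
    rw [hD, PySem.Dict.keys_foldl_modify_key player_names key [] (fun _ n l => l ++ [n])]
    simp [PySem.Set.update, PySem.Set.ofList_eq_foldl, PySem.Dict.keys_empty]
  have hgetD : ∀ c, D.getD c [] = player_names.filter (fun n => key n == c) := by
    intro c
    have hfold : D = (player_names.map (fun n => (key n, n))).foldl
        (fun d p => d.modify p.1 [] (fun l => l ++ [p.2])) PySem.Dict.empty := by
      rw [hD, List.foldl_map]
    rw [hfold, PySem.Dict.getD_foldl_modify_append, PySem.Dict.getD_empty,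
      List.filter_map, List.map_map]
    simp [Function.comp_def]
  rw [PySem.Dict.items_eq_map_keys D hnd [], hkeys]
  exact List.map_congr_left fun q _ => by rw [hgetD q]

-- updating past a disjoint prefix: update (s ++ t) xs = s ++ update t xs when xs avoids s
theorem pvUpdate_append (xs : List String) (s t : List String)
    (h : ∀ y ∈ xs, ¬ y ∈ s) :
    PySem.Set.update (s ++ t) xs = s ++ PySem.Set.update t xs := by
  induction xs generalizing t with
  | nil => rfl
  | cons y ys ih =>
      have hy : ¬ y ∈ s := h y (by simp)
      have hys : ∀ z ∈ ys, ¬ z ∈ s := fun z hz => h z (by simp [hz])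
      simp only [PySem.Set.update, List.foldl_cons] at *
      by_cases hct : y ∈ t
      · have ha1 : PySem.Set.add (s ++ t) y = s ++ t := by
          simp [PySem.Set.add, PySem.Set.contains, List.contains_eq_mem, hct]
        have ha2 : PySem.Set.add t y = t := by
          simp [PySem.Set.add, PySem.Set.contains, List.contains_eq_mem, hct]
        rw [ha1, ha2]
        exact ih t hys
      · have ha1 : PySem.Set.add (s ++ t) y = s ++ (t ++ [y]) := by
          simp [PySem.Set.add, PySem.Set.contains, List.contains_eq_mem, hy, hct]
        have ha2 : PySem.Set.add t y = t ++ [y] := by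
          simp [PySem.Set.add, PySem.Set.contains, List.contains_eq_mem, hct]
        rw [ha1, ha2]
        exact ih (t ++ [y]) hys

-- elements already present are skipped: filtering them out of the update changes nothing
theorem pvUpdate_filter (x : String) (xs : List String) (s : List String) (hx : x ∈ s) :
    PySem.Set.update s xs = PySem.Set.update s (xs.filter (fun y => !(y == x))) := by
  induction xs generalizing s with
  | nil => rfl
  | cons y ys ih =>
      by_cases hyx : y = x
      · subst hyx
        have hadd : PySem.Set.add s y = s := by
          simp [PySem.Set.add, PySem.Set.contains, List.contains_eq_mem, hx]
        simp only [PySem.Set.update, List.foldl_cons, List.filter_cons, beq_self_eq_true,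
          Bool.not_true] at *
        rw [hadd]
        exact ih s hx
      · have hb : (!(y == x)) = true := by simp [hyx]
        simp only [PySem.Set.update, List.foldl_cons, List.filter_cons, hb, reduceIte] at *
        have hx' : x ∈ PySem.Set.add s y := by
          simp only [PySem.Set.add]
          split <;> simp [hx]
        exact ih (PySem.Set.add s y) hx'

-- the first-occurrence dedup peels off its head together with all its duplicates
theorem pvDedup_cons (x : String) (xs : List String) :
    PySem.List.dedup (x :: xs) = x :: PySem.List.dedup (xs.filter (fun y => !(y == x))) := by
  have h0 : PySem.List.dedup (x :: xs) = PySem.Set.update [x] xs := by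
    simp [PySem.List.dedup_eq_ofList, PySem.Set.ofList_eq_foldl, PySem.Set.update,
      PySem.Set.add, PySem.Set.contains]
  rw [h0, pvUpdate_filter x xs [x] (by simp)]
  have h1 : ∀ y ∈ xs.filter (fun y => !(y == x)), ¬ y ∈ ([x] : List String) := by
    intro y hy
    simp only [List.mem_filter, Bool.not_eq_eq_eq_not, Bool.not_true, beq_eq_false_iff_ne] at hy
    simp [hy.2]
  have h2 := pvUpdate_append (xs.filter (fun y => !(y == x))) [x] [] h1
  simp only [List.append_nil] at h2
  rw [h2]
  simp [PySem.List.dedup_eq_ofList, PySem.Set.ofList_eq_foldl, PySem.Set.update]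

-- ===== B-side lemmas: stability of the sort, run structure, first-appearance order =====

-- the (first index, prefix, member names) descriptor of prefix q's group in the triple list P
def pvGroupOf (P : List (String × Int × String)) (q : String) : Int × String × List String :=
  (((P.filter (fun t => t.1 == q)).headD ("", 0, "")).2.1, q,
   (P.filter (fun t => t.1 == q)).map (fun u => u.2.2))

-- inserting an element of another key class does not disturb a class
theorem pvInsertBy_filter_ne {α : Type} (key : α → String) (q : String) (x : α) (ys : List α)
    (hx : (key x == q) = false) :
    (PySem.List.insertBy (fun a b => decide (key a < key b)) x ys).filter (fun z => key z == q)
      = ys.filter (fun z => key z == q) := by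
  induction ys with
  | nil => simp [PySem.List.insertBy, hx]
  | cons y ys ih =>
      simp only [PySem.List.insertBy]
      split
      · simp [List.filter_cons, hx]
      · simp only [List.filter_cons]
        split <;> rw [ih]

-- inserting an element of a class into a sorted list puts it at that class's end
theorem pvInsertBy_filter_eq {α : Type} (key : α → String) (q : String) (x : α) (ys : List α)
    (hx : key x = q) (hys : ys.Pairwise (fun a b => key a ≤ key b)) :
    (PySem.List.insertBy (fun a b => decide (key a < key b)) x ys).filter (fun z => key z == q)
      = ys.filter (fun z => key z == q) ++ [x] := by
  induction ys with
  | nil => simp [PySem.List.insertBy, hx]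
  | cons y ys ih =>
      rw [List.pairwise_cons] at hys
      simp only [PySem.List.insertBy]
      split
      · rename_i hlt
        rw [decide_eq_true_iff] at hlt
        have hnil : (y :: ys).filter (fun z => key z == q) = [] := by
          rw [List.filter_eq_nil_iff]
          intro z hz
          have hge : key y ≤ key z := by
            rcases hz with _ | hz
            · exact le_refl _
            · exact hys.1 z (by assumption)
          have : q < key z := lt_of_lt_of_le (hx ▸ hlt) hge
          simp [ne_of_gt this]
        rw [List.filter_cons_of_pos (by simp [hx]), hnil]
        simp
      · rw [List.filter_cons, List.filter_cons]
        split
        · rw [ih hys.2]; rfl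
        · exact ih hys.2

-- the whole insertion sort preserves each key class in order (stability)
theorem pvFoldl_insertBy_filter {α : Type} (key : α → String) (q : String) :
    ∀ (xs acc : List α), acc.Pairwise (fun a b => key a ≤ key b) →
    (xs.foldl (fun acc x => PySem.List.insertBy (fun a b => decide (key a < key b)) x acc) acc).filter
        (fun z => key z == q)
      = acc.filter (fun z => key z == q) ++ xs.filter (fun z => key z == q) := by
  intro xs
  induction xs with
  | nil => intro acc _; simp
  | cons x xs ih =>
      intro acc hacc
      rw [List.foldl_cons]
      rw [ih _ (PySem.List.insertBy_pairwise_le key x acc hacc)]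
      by_cases hx : key x = q
      · rw [pvInsertBy_filter_eq key q x acc hx hacc,
          List.filter_cons_of_pos (by simp [hx]), List.append_assoc]
        rfl
      · rw [pvInsertBy_filter_ne key q x acc (by simp [hx]),
          List.filter_cons_of_neg (by simp [hx])]

theorem pvSorted_filter {α : Type} (key : α → String) (q : String) (xs : List α) :
    (PySem.List.sorted xs key false).filter (fun z => key z == q)
      = xs.filter (fun z => key z == q) := by
  rw [PySem.List.sorted_eq_foldl_insertBy, pvFoldl_insertBy_filter key q xs [] (by simp)]
  rfl

-- in a key-sorted list the head's class is an initial run: takeWhile is filter, dropWhile the rest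
theorem pvSortedSplit {α : Type} (key : α → String) (k : String) :
    ∀ (l : List α), l.Pairwise (fun a b => key a ≤ key b) → (∀ u ∈ l, k ≤ key u) →
    l.takeWhile (fun u => key u == k) = l.filter (fun u => key u == k) ∧
    l.dropWhile (fun u => key u == k) = l.filter (fun u => !(key u == k)) := by
  intro l
  induction l with
  | nil => intro _ _; simp
  | cons y ys ih =>
      intro hp hk
      rw [List.pairwise_cons] at hp
      by_cases hy : key y = k
      · have h1 : ∀ u ∈ ys, k ≤ key u := fun u hu => hy ▸ hp.1 u hu
        have := ih hp.2 h1
        simp only [List.takeWhile_cons, List.dropWhile_cons, List.filter_cons, hy,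
          beq_self_eq_true, Bool.not_true, reduceIte, this.1, this.2]
        simp
      · have hlt : k < key y := lt_of_le_of_ne (hk y (by simp)) (fun h => hy h.symm)
        have hnil : ∀ u ∈ y :: ys, ¬ (key u = k) := by
          intro u hu
          rcases hu with _ | hu
          · exact hy
          · exact ne_of_gt (lt_of_lt_of_le hlt (hp.1 u (by assumption)))
        constructor
        · rw [List.takeWhile_cons_of_neg (by simp [hy]), List.filter_eq_nil_iff.mpr
            (by intro u hu; simp [hnil u hu])]
        · rw [List.dropWhile_cons_of_neg (by simp [hy])]
          rw [List.filter_eq_self.mpr (by intro u hu; simp [hnil u hu])]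

-- the run scan over a key-sorted list produces one group per distinct key, in order of appearance
theorem pvScanRuns_eq_aux :
    ∀ (N : Nat) (S : List (String × Int × String)), S.length ≤ N →
    S.Pairwise (fun a b => a.1 ≤ b.1) →
    pvScanRuns S = (PySem.List.dedup (S.map (fun t => t.1))).map (pvGroupOf S) := by
  intro N
  induction N with
  | zero =>
      intro S hS _
      have : S = [] := List.length_eq_zero_iff.mp (Nat.le_zero.mp hS)
      subst this; simp [pvScanRuns, PySem.List.dedup, PySem.Set.ofList]
  | succ N ih =>
      intro S hS h
      match S with
      | [] => simp [pvScanRuns, PySem.List.dedup, PySem.Set.ofList]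
      | t :: rest =>
        rw [List.pairwise_cons] at h
        have hk : ∀ u ∈ t :: rest, t.1 ≤ u.1 := by
          intro u hu
          rcases hu with _ | hu
          · exact le_refl _
          · exact h.1 u (by assumption)
        obtain ⟨htake, hdrop⟩ :=
          pvSortedSplit (fun u : String × Int × String => u.1) t.1 (t :: rest)
            (List.pairwise_cons.mpr h) hk
        have hrest' : (t :: rest).filter (fun u => !(u.1 == t.1))
            = rest.filter (fun u => !(u.1 == t.1)) := by
          simp
        have hlen : ((t :: rest).filter (fun u => !(u.1 == t.1))).length ≤ N := by
          rw [hrest']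
          exact le_trans (List.length_filter_le _ _) (Nat.succ_le_succ_iff.mp hS)
        have hpw : ((t :: rest).filter (fun u => !(u.1 == t.1))).Pairwise
            (fun a b => a.1 ≤ b.1) :=
          (List.pairwise_cons.mpr h).sublist List.filter_sublist
        rw [pvScanRuns]
        rw [htake, hdrop, ih _ hlen hpw]
        have hmapf : ((t :: rest).filter (fun u => !(u.1 == t.1))).map (fun u => u.1)
            = ((t :: rest).map (fun u => u.1)).filter (fun y => !(y == t.1)) := by
          rw [List.filter_map]; rfl
        have hded : PySem.List.dedup ((t :: rest).map (fun u => u.1))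
            = t.1 :: PySem.List.dedup (((t :: rest).filter (fun u => !(u.1 == t.1))).map
                (fun u => u.1)) := by
          rw [hmapf]
          rw [show (t :: rest).map (fun u : String × Int × String => u.1)
              = t.1 :: rest.map (fun u => u.1) from rfl, pvDedup_cons]
          rw [show (t.1 :: rest.map (fun u : String × Int × String => u.1)).filter
                (fun y => !(y == t.1))
              = (rest.map (fun u : String × Int × String => u.1)).filter (fun y => !(y == t.1))
            from by simp]
        rw [hded]
        rw [List.map_cons]
        refine congrArg₂ List.cons ?_ ?_
        · show _ = pvGroupOf (t :: rest) t.1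
          unfold pvGroupOf
          rw [List.filter_cons_of_pos (by simp)]
          rfl
        · apply List.map_congr_left
          intro q hq
          have hqt : q ≠ t.1 := by
            have hq' := (PySem.List.mem_dedup _ _).mp hq
            simp only [List.mem_map, List.mem_filter, Bool.not_eq_eq_eq_not, Bool.not_true,
              beq_eq_false_iff_ne] at hq'
            obtain ⟨u, ⟨_, hu⟩, rfl⟩ := hq'
            exact hu
          unfold pvGroupOf
          have hfe : ((t :: rest).filter (fun u => !(u.1 == t.1))).filter (fun u => u.1 == q)
              = (t :: rest).filter (fun u => u.1 == q) := by
            rw [List.filter_filter]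
            apply List.filter_congr
            intro u _
            by_cases hu : u.1 = q
            · simp [hu, hqt]
            · simp [hu]
          rw [hfe]

theorem pvScanRuns_eq (S : List (String × Int × String))
    (h : S.Pairwise (fun a b => a.1 ≤ b.1)) :
    pvScanRuns S = (PySem.List.dedup (S.map (fun t => t.1))).map (pvGroupOf S) :=
  pvScanRuns_eq_aux S.length S (le_refl _) h

-- the default head of a nonempty list is its member
theorem pvHeadD_mem {α : Type} (l : List α) (d : α) (h : l ≠ []) : l.headD d ∈ l := by
  cases l with
  | nil => exact absurd rfl h
  | cons x xs => simp

-- first-appearance indices are strictly increasing along dedup order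
theorem pvFirstIdx_pairwise :
    ∀ (N : Nat) (P : List (String × Int × String)), P.length ≤ N →
    P.Pairwise (fun a b => a.2.1 < b.2.1) →
    ((PySem.List.dedup (P.map (fun t => t.1))).map (pvGroupOf P)).Pairwise
      (fun a b => a.1 < b.1) := by
  intro N
  induction N with
  | zero =>
      intro P hP _
      have : P = [] := List.length_eq_zero_iff.mp (Nat.le_zero.mp hP)
      subst this; simp [PySem.List.dedup, PySem.Set.ofList]
  | succ N ih =>
      intro P hP h
      match P with
      | [] => simp [PySem.List.dedup, PySem.Set.ofList]
      | t :: rest =>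
        rw [List.pairwise_cons] at h
        have hmapf : (rest.filter (fun u => !(u.1 == t.1))).map (fun u => u.1)
            = (rest.map (fun u => u.1)).filter (fun y => !(y == t.1)) := by
          rw [List.filter_map]; rfl
        have hded : PySem.List.dedup ((t :: rest).map (fun u => u.1))
            = t.1 :: PySem.List.dedup ((rest.filter (fun u => !(u.1 == t.1))).map
                (fun u => u.1)) := by
          rw [show (t :: rest).map (fun u : String × Int × String => u.1)
              = t.1 :: rest.map (fun u => u.1) from rfl, pvDedup_cons, hmapf]
        rw [hded, List.map_cons]
        have htail : (PySem.List.dedup ((rest.filter (fun u => !(u.1 == t.1))).map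
              (fun u => u.1))).map (pvGroupOf (t :: rest))
            = (PySem.List.dedup ((rest.filter (fun u => !(u.1 == t.1))).map
              (fun u => u.1))).map (pvGroupOf (rest.filter (fun u => !(u.1 == t.1)))) := by
          apply List.map_congr_left
          intro q hq
          have hqt : q ≠ t.1 := by
            have hq' := (PySem.List.mem_dedup _ _).mp hq
            simp only [List.mem_map, List.mem_filter, Bool.not_eq_eq_eq_not, Bool.not_true,
              beq_eq_false_iff_ne] at hq'
            obtain ⟨u, ⟨_, hu⟩, rfl⟩ := hq'
            exact hu
          unfold pvGroupOf
          have h1 : (t :: rest).filter (fun u => u.1 == q) = rest.filter (fun u => u.1 == q) := by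
            rw [List.filter_cons_of_neg (by simp [Ne.symm hqt])]
          have h2 : (rest.filter (fun u => !(u.1 == t.1))).filter (fun u => u.1 == q)
              = rest.filter (fun u => u.1 == q) := by
            rw [List.filter_filter]
            apply List.filter_congr
            intro u _
            by_cases hu : u.1 = q
            · simp [hu, hqt]
            · simp [hu]
          rw [h1, h2]
        rw [htail]
        refine List.pairwise_cons.mpr ⟨?_, ?_⟩
        · intro b hb
          obtain ⟨q, hq, rfl⟩ := List.mem_map.mp hb
          have hhead : (pvGroupOf (t :: rest) t.1).1 = t.2.1 := by
            unfold pvGroupOf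
            rw [List.filter_cons_of_pos (by simp)]
            rfl
          rw [hhead]
          have hne : (rest.filter (fun u => !(u.1 == t.1))).filter (fun u => u.1 == q) ≠ [] := by
            have hq' := (PySem.List.mem_dedup _ _).mp hq
            obtain ⟨u, hu, rfl⟩ := List.mem_map.mp hq'
            intro hnil
            have : u ∈ (rest.filter (fun v => !(v.1 == t.1))).filter (fun v => v.1 == u.1) :=
              List.mem_filter.mpr ⟨hu, by simp⟩
            rw [hnil] at this
            exact absurd this (List.not_mem_nil)
          have hmem := pvHeadD_mem _ (("", 0, "") : String × Int × String) hne
          have : ((rest.filter (fun u => !(u.1 == t.1))).filter (fun u => u.1 == q)).headD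
              ("", 0, "") ∈ rest :=
            List.filter_sublist.subset (List.filter_sublist.subset hmem)
          exact h.1 _ this
        · exact ih _ (le_trans (List.length_filter_le _ _) (Nat.succ_le_succ_iff.mp hP))
            (h.2.sublist List.filter_sublist)

-- enumerate: projecting the values back out commutes with filtering
theorem pvEnum_filter_map (Pred : String → Bool) :
    ∀ (xs : List String) (s : Int),
    ((PySem.List.enumerate xs s).filter (fun p => Pred p.2)).map (fun p => p.2)
      = xs.filter Pred := by
  intro xs
  induction xs with
  | nil => intro s; simp [PySem.List.enumerate]
  | cons x xs ih =>
      intro s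
      rw [show PySem.List.enumerate (x :: xs) s = (s, x) :: PySem.List.enumerate xs (s + 1)
        from rfl]
      simp only [List.filter_cons]
      split <;> simp [ih (s + 1)]

-- enumerate: projecting the values back out
theorem pvEnum_map_snd : ∀ (xs : List String) (s : Int),
    (PySem.List.enumerate xs s).map (fun p => p.2) = xs := by
  intro xs
  induction xs with
  | nil => intro s; rfl
  | cons x xs ih =>
      intro s
      rw [show PySem.List.enumerate (x :: xs) s = (s, x) :: PySem.List.enumerate xs (s + 1)
        from rfl, List.map_cons, ih]

-- B's whole pipeline computes the dedup-then-gather list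
theorem pvAlt_eq (player_names : List String) (prefix_length : Int) :
    group_players_by_team_alt player_names prefix_length
    = (PySem.List.dedup (player_names.map (pvKey prefix_length))).map
        (fun q => (q, player_names.filter (fun n => pvKey prefix_length n == q))) := by
  unfold group_players_by_team_alt
  set key := pvKey prefix_length with hkey
  set E := PySem.List.enumerate player_names 0 with hE
  set P := E.map (fun p => (key p.2, p.1, p.2)) with hP
  set S := PySem.List.sorted P (fun t => t.1) false with hS
  have hGS : pvGroupOf S = pvGroupOf P := by
    funext q
    unfold pvGroupOf
    have hst := pvSorted_filter (fun t : String × Int × String => t.1) q P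
    simp only [← hS] at hst
    rw [hst]
  have hpair : S.Pairwise (fun a b => a.1 ≤ b.1) :=
    PySem.List.sorted_pairwise P (fun t : String × Int × String => t.1)
  have hruns : pvScanRuns S = (PySem.List.dedup (S.map (fun t => t.1))).map (pvGroupOf P) := by
    rw [pvScanRuns_eq S hpair, hGS]
  have hpermP : S.Perm P := PySem.List.sorted_perm P _ false
  have hdd : (PySem.List.dedup (S.map (fun t => t.1))).Perm
      (PySem.List.dedup (P.map (fun t => t.1))) := by
    rw [List.perm_ext_iff_of_nodup (PySem.List.nodup_dedup _) (PySem.List.nodup_dedup _)]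
    intro a
    rw [PySem.List.mem_dedup, PySem.List.mem_dedup]
    exact (hpermP.map (fun t => t.1)).mem_iff
  have hM : (pvScanRuns S).Perm
      ((PySem.List.dedup (P.map (fun t => t.1))).map (pvGroupOf P)) := by
    rw [hruns]; exact hdd.map _
  have hPidx : P.Pairwise (fun a b => a.2.1 < b.2.1) := by
    have he := PySem.List.pairwise_lt_enumerate player_names (0 : Int)
    exact List.Pairwise.map _ (fun a b hab => by simpa using hab) he
  have hMpw := pvFirstIdx_pairwise P.length P (le_refl _) hPidx
  have hsorted2 : PySem.List.sorted (pvScanRuns S) (fun r => r.1) false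
      = (PySem.List.dedup (P.map (fun t => t.1))).map (pvGroupOf P) :=
    PySem.List.sorted_eq_of_perm_of_pairwise_lt _ _ _ hM.symm hMpw
  show (PySem.List.sorted (pvScanRuns S) (fun r => r.1) false).map (fun r => (r.2.1, r.2.2)) = _
  rw [hsorted2, List.map_map]
  have hPfst : P.map (fun t => t.1) = player_names.map key := by
    rw [hP, List.map_map]
    rw [show ((fun t : String × Int × String => t.1) ∘ (fun p : Int × String => (key p.2, p.1, p.2)))
        = key ∘ (fun p : Int × String => p.2) from rfl]
    rw [← List.map_map, hE, pvEnum_map_snd]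
  rw [hPfst]
  apply List.map_congr_left
  intro q _
  show (q, (P.filter (fun t => t.1 == q)).map (fun u => u.2.2))
      = (q, player_names.filter (fun n => key n == q))
  have h1 : P.filter (fun t => t.1 == q)
      = (E.filter (fun p => key p.2 == q)).map (fun p => (key p.2, p.1, p.2)) := by
    rw [hP, List.filter_map]; rfl
  rw [h1, List.map_map]
  rw [show ((fun u : String × Int × String => u.2.2)
      ∘ (fun p : Int × String => (key p.2, p.1, p.2))) = (fun p : Int × String => p.2) from rfl]
  have h2 := pvEnum_filter_map (fun n => key n == q) player_names 0
  rw [hE]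
  exact congrArg (Prod.mk q) h2

-- ===== VERDICT (by name: the statement is the Claim_ definition above) =====
theorem group_players_by_team_spec : Claim_equal_group_players_by_team := by
  intro player_names prefix_length _
  show group_players_by_team player_names prefix_length = group_players_by_team_alt player_names prefix_length
  unfold group_players_by_team
  rw [pvFold_eq, pvItems_eq, pvAlt_eq]
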